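-- pv_equiv track=rewrite | github.com/lumentechnologylabs-source/gig-agent-backend | gig_agent/filters.py | filter_company_blocklist
-- ===== SOURCE A (Python) =====
-- from typing import Iterable, List, Dict, Optional
--
-- Listing = Dict[str, object]
--
-- def _normalize(text: Optional[str]) -> str:
--     return (text or "").strip().lower()
--
-- def filter_company_blocklist(listings: Iterable[Listing], blocked: List[str]) -> List[Listing]:
--     if not blocked:
--         return list(listings)
--
--     blocked_norm = [_normalize(c) for c in blocked]
--     result: List[Listing] = []
--
--     for row in listings:
--         company = _normalize(str(row.get("company", "")))
--         if company and any(b and b in company for b in blocked_norm):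
--             continue
--         result.append(row)
--
--     return result
-- ===== SOURCE B (Python) =====
-- def filter_company_blocklist(listings, blocked):
--     """Drop listings whose company name contains a blocked substring.
--
--     Normalizes the blocklist once (dropping empty entries) and memoizes the
--     verdict per distinct normalized company, so each company name is matched
--     against the blocklist only once.
--     """
--     patterns = [p for p in (b.strip().lower() for b in blocked) if p]
--     rows = list(listings)
--     flagged = {}
--     for row in rows:
--         company = str(row.get("company", "")).strip().lower()
--         if company not in flagged:
--             flagged[company] = any(p in company for p in patterns)
--     return [row for row in rows
--             if not flagged[str(row.get("company", "")).strip().lower()]]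
-- ===== Notes on version B (the rewrite author's own statement) =====
-- stated objective: alternative
-- what changed: Instead of A's skip/append loop that re-runs every blocklist pattern on every row (with empty-pattern and empty-blocklist special cases), B normalizes the blocklist once dropping empty patterns, memoizes the match verdict per distinct normalized company in a dict, and returns a filter comprehension over that index.
import Mathlib
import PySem

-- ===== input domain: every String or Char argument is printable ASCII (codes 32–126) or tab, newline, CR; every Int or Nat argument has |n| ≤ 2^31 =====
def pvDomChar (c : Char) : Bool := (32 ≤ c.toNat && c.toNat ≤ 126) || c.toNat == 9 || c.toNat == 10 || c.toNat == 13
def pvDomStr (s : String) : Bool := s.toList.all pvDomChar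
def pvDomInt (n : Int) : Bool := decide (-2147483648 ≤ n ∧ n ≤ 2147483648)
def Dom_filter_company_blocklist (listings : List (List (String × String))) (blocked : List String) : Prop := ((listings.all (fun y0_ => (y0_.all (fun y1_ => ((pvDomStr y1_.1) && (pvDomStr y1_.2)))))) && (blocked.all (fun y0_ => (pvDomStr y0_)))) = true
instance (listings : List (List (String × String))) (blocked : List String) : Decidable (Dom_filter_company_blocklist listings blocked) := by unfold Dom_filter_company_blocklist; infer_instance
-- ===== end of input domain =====

-- B normalizes the blocklist once (dropping empty patterns) and memoizes the verdict per
-- distinct normalized company in a dict, then filters through that index (alternative).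

-- ===== PORT A =====
-- _normalize(text) = text.strip().lower()
def pvNormalize (s : String) : String := PySem.Str.lower (PySem.Str.strip s)

def filter_company_blocklist (listings : List (List (String × String))) (blocked : List String) : List (List (String × String)) :=
  if blocked = [] then listings
  else
    let blocked_norm := blocked.map (fun c => pvNormalize c)
    listings.foldl (fun result row =>
      let company := pvNormalize (PySem.Dict.getD (PySem.Dict.mk row) "company" "")
      if !(company == "") && blocked_norm.any (fun b => !(b == "") && PySem.Str.isIn b company)
      then result
      else result ++ [row]) []

-- ===== PORT B =====
-- str(row.get("company", "")).strip().lower()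
def pvKey (row : List (String × String)) : String :=
  PySem.Str.lower (PySem.Str.strip (PySem.Dict.getD (PySem.Dict.mk row) "company" ""))

def filter_company_blocklist_alt (listings : List (List (String × String))) (blocked : List String) : List (List (String × String)) :=
  let patterns := (blocked.map (fun b => PySem.Str.lower (PySem.Str.strip b))).filter (fun p => !(p == ""))
  let flagged := listings.foldl (fun d row =>
      let company := pvKey row
      if d.contains company then d
      else d.insert company (patterns.any (fun p => PySem.Str.isIn p company))) PySem.Dict.empty
  -- Source B indexes `flagged[...]`: the key is always present (inserted by the loop above),
  -- so getD with any default is exact; it never raises.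
  listings.filter (fun row => !(flagged.getD (pvKey row) false))

-- ===== PRECONDITION & SPEC =====
def Spec_filter_company_blocklist (listings : List (List (String × String))) (blocked : List String) (out : List (List (String × String))) : Prop := out = filter_company_blocklist_alt listings blocked
instance (listings : List (List (String × String))) (blocked : List String) (out : List (List (String × String))) : Decidable (Spec_filter_company_blocklist listings blocked out) := by unfold Spec_filter_company_blocklist; infer_instance

-- ===== CLAIM =====
def Claim_equal_filter_company_blocklist : Prop := ∀ (listings : List (List (String × String))) (blocked : List String), Dom_filter_company_blocklist listings blocked → Spec_filter_company_blocklist listings blocked (filter_company_blocklist listings blocked)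

-- ===== LEMMAS AND PROOFS =====

-- the per-company verdict over the pre-filtered patterns
def pvFlag (patterns : List String) (c : String) : Bool :=
  patterns.any (fun p => PySem.Str.isIn p c)

-- a nonempty pattern never matches the empty company; with that, B's verdict equals A's row test
theorem pvFlag_eq (norms : List String) (c : String) :
    pvFlag (norms.filter (fun p => !(p == ""))) c
      = (!(c == "") && norms.any (fun b => !(b == "") && PySem.Str.isIn b c)) := by
  by_cases hc : c = ""
  · subst hc
    simp only [beq_self_eq_true, Bool.not_true, Bool.false_and]
    rw [pvFlag, List.any_eq_false]
    intro p hp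
    simp only [List.mem_filter, Bool.not_eq_eq_eq_not, Bool.not_true, beq_eq_false_iff_ne,
      ne_eq] at hp
    rw [Bool.not_eq_true]
    cases h : PySem.Str.isIn p ""
    · rfl
    · exfalso
      rw [PySem.Str.isIn_iff_infix] at h
      have : p.toList = [] := List.eq_nil_of_infix_nil h
      exact hp.2 (by ext; simp [this])
  · have hc' : (!(c == "")) = true := by simp [hc]
    rw [hc', Bool.true_and, pvFlag, List.any_filter]

-- once a key is stored, the memo loop never changes it (it only inserts absent keys)
theorem pvMemo_persist (patterns : List String) (rows : List (List (String × String)))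
    (d : PySem.Dict String Bool) (c : String) (v : Bool) (h : d.get? c = some v) :
    (rows.foldl (fun d row =>
        if d.contains (pvKey row) then d
        else d.insert (pvKey row) (pvFlag patterns (pvKey row))) d).get? c = some v := by
  induction rows generalizing d with
  | nil => exact h
  | cons row rest ih =>
      simp only [List.foldl_cons]
      by_cases hco : d.contains (pvKey row) = true
      · rw [if_pos hco]; exact ih d h
      · rw [if_neg hco]
        apply ih
        rw [PySem.Dict.get?_insert]
        split
        · rename_i heq
          subst heq
          rw [PySem.Dict.contains_eq_isSome_get?, h] at hco
          simp at hco
        · exact h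

-- every row's key is present with its verdict after the memo loop
theorem pvMemo_lookup (patterns : List String) (rows : List (List (String × String)))
    (d : PySem.Dict String Bool) (hd : ∀ c v, d.get? c = some v → v = pvFlag patterns c)
    (row : List (String × String)) (hrow : row ∈ rows) :
    (rows.foldl (fun d row =>
        if d.contains (pvKey row) then d
        else d.insert (pvKey row) (pvFlag patterns (pvKey row))) d).get?
      (pvKey row) = some (pvFlag patterns (pvKey row)) := by
  induction rows generalizing d with
  | nil => cases hrow
  | cons r rest ih =>
      simp only [List.foldl_cons]
      rcases List.mem_cons.mp hrow with rfl | hmem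
      · by_cases hco : d.contains (pvKey row) = true
        · rw [if_pos hco]
          rw [PySem.Dict.contains_eq_isSome_get?] at hco
          obtain ⟨v, hv⟩ := Option.isSome_iff_exists.mp hco
          rw [hd _ _ hv] at hv
          exact pvMemo_persist patterns rest d _ _ hv
        · rw [if_neg hco]
          exact pvMemo_persist patterns rest _ _ _ (PySem.Dict.get?_insert_self _ _ _)
      · by_cases hco : d.contains (pvKey r) = true
        · rw [if_pos hco]; exact ih d hd hmem
        · rw [if_neg hco]
          refine ih _ ?_ hmem
          intro c' v' h'
          rw [PySem.Dict.get?_insert] at h'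
          split at h'
          · rename_i heq; cases h'; subst heq; rfl
          · exact hd c' v' h'

-- each port equals the same plain filter over pvFlag
theorem pvB_eq_filter (listings : List (List (String × String))) (blocked : List String) :
    filter_company_blocklist_alt listings blocked
      = listings.filter (fun row =>
          !(pvFlag ((blocked.map (fun b => PySem.Str.lower (PySem.Str.strip b))).filter
              (fun p => !(p == ""))) (pvKey row))) := by
  show listings.filter (fun row =>
      !((listings.foldl (fun d row =>
          if d.contains (pvKey row) then d
          else d.insert (pvKey row)
            (((blocked.map (fun b => PySem.Str.lower (PySem.Str.strip b))).filter
              (fun p => !(p == ""))).any (fun p => PySem.Str.isIn p (pvKey row))))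
          PySem.Dict.empty).getD (pvKey row) false)) = _
  apply List.filter_congr
  intro row hrow
  have := pvMemo_lookup
    ((blocked.map (fun b => PySem.Str.lower (PySem.Str.strip b))).filter (fun p => !(p == "")))
    listings PySem.Dict.empty (by intro c v h; rw [PySem.Dict.get?_empty] at h; cases h) row hrow
  simp only [pvFlag] at this ⊢
  rw [PySem.Dict.getD_eq_get?_getD, this, Option.getD_some]

theorem pvA_eq_filter (listings : List (List (String × String))) (blocked : List String) :
    filter_company_blocklist listings blocked
      = listings.filter (fun row =>
          !(pvFlag ((blocked.map (fun b => PySem.Str.lower (PySem.Str.strip b))).filter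
              (fun p => !(p == ""))) (pvKey row))) := by
  unfold filter_company_blocklist
  by_cases hb : blocked = []
  · subst hb
    simp [pvFlag]
  · rw [if_neg hb]
    show listings.foldl (fun result row =>
        if (!(pvNormalize (PySem.Dict.getD (PySem.Dict.mk row) "company" "") == "") &&
            (blocked.map (fun c => pvNormalize c)).any
              (fun b => !(b == "") && PySem.Str.isIn b
                (pvNormalize (PySem.Dict.getD (PySem.Dict.mk row) "company" ""))))
        then result else result ++ [row]) [] = _
    have hfold :
        (fun (result : List (List (String × String))) row =>
            if (!(pvNormalize (PySem.Dict.getD (PySem.Dict.mk row) "company" "") == "") &&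
                (blocked.map (fun c => pvNormalize c)).any
                  (fun b => !(b == "") && PySem.Str.isIn b
                    (pvNormalize (PySem.Dict.getD (PySem.Dict.mk row) "company" ""))))
            then result else result ++ [row])
          = (fun result row =>
            if (!(!(pvNormalize (PySem.Dict.getD (PySem.Dict.mk row) "company" "") == "") &&
                (blocked.map (fun c => pvNormalize c)).any
                  (fun b => !(b == "") && PySem.Str.isIn b
                    (pvNormalize (PySem.Dict.getD (PySem.Dict.mk row) "company" ""))))) = true
            then result ++ [row] else result) := by
      funext result row
      cases h : (!(pvNormalize (PySem.Dict.getD (PySem.Dict.mk row) "company" "") == "") &&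
          (blocked.map (fun c => pvNormalize c)).any
            (fun b => !(b == "") && PySem.Str.isIn b
              (pvNormalize (PySem.Dict.getD (PySem.Dict.mk row) "company" "")))) <;> simp
    rw [hfold, PySem.List.foldl_append_if_eq_filter, List.nil_append]
    apply List.filter_congr
    intro row _
    rw [pvFlag_eq (blocked.map (fun b => PySem.Str.lower (PySem.Str.strip b))) (pvKey row)]
    simp [pvNormalize, pvKey]

-- ===== VERDICT =====
theorem filter_company_blocklist_spec : Claim_equal_filter_company_blocklist := by
  intro listings blocked _
  unfold Spec_filter_company_blocklist
  rw [pvB_eq_filter, pvA_eq_filter]
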